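-- pv_equiv track=rewrite | github.com/davidkarpay/Library-of-Babel | library.py | build_alpha_index
-- ===== SOURCE A (Python) =====
-- from collections import defaultdict
--
-- def build_alpha_index(entries: list) -> dict:
--     """Build index of entries by first letter of title."""
--     alpha = defaultdict(list)
--     for entry in entries:
--         title = entry.get("title", "")
--         if title:
--             first_char = title[0].lower()
--             if first_char.isalpha():
--                 alpha[first_char].append(entry)
--             else:
--                 alpha["0-9"].append(entry)
--     return alpha
-- ===== SOURCE B (Python) =====
-- from collections import defaultdict
--
--
-- def _bucket(title):
--     c = title[0].lower()
--     return c if c.isalpha() else "0-9"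
--
--
-- def build_alpha_index(entries: list) -> dict:
--     """Build index of entries by first letter of title."""
--     keyed = [(_bucket(e.get("title", "")), e) for e in entries if e.get("title", "")]
--     keys = list(dict.fromkeys(k for k, _ in keyed))
--     return defaultdict(list, {k: [e for kk, e in keyed if kk == k] for k in keys})
-- ===== Notes on version B (the rewrite author's own statement) =====
-- stated objective: alternative
-- what changed: Replaces the single pass that mutates a defaultdict per entry with a declarative pipeline: tag each kept entry with its bucket key, take the distinct keys in first-occurrence order via dict.fromkeys, and build each bucket by filtering the tagged list per key.
import Mathlib
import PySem

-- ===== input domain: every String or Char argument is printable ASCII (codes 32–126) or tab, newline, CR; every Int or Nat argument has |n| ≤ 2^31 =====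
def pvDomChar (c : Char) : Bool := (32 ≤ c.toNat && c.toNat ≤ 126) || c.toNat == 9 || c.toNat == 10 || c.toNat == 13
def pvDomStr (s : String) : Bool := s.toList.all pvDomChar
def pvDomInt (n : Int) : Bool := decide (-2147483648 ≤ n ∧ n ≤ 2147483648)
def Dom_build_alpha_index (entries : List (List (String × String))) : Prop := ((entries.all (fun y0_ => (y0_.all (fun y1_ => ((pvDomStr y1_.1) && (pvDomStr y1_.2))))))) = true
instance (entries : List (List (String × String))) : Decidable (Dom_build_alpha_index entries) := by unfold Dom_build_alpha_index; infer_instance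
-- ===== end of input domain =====

-- B replaces A's single mutating defaultdict pass with a tag/dedup/filter-per-key pipeline (objective: alternative decomposition, same results).

-- ===== PORT A =====
-- A: one pass; for each entry with a non-empty title, append it to the bucket of its lowered first character ("0-9" if not alphabetic).
def build_alpha_index (entries : List (List (String × String))) : List (String × List (List (String × String))) :=
  (entries.foldl
    (fun alpha entry =>
      let title := (PySem.Dict.mk entry).getD "title" ""
      match title.toList with
      | [] => alpha                       -- 'if title:' fails: entry skipped
      | c :: _ =>                         -- title[0] exists; first_char = title[0].lower()
        let fc := PySem.Chars.lowerChar c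
        if PySem.Chars.isalpha fc then
          alpha.modify (String.ofList [fc]) [] (fun v => v ++ [entry])
        else
          alpha.modify "0-9" [] (fun v => v ++ [entry]))
    PySem.Dict.empty).items

-- ===== PORT B =====
-- B's _bucket helper (assumes non-empty title, as in Source B)
def pvBucket (c : Char) : String :=
  let fc := PySem.Chars.lowerChar c
  if PySem.Chars.isalpha fc then String.ofList [fc] else "0-9"

def build_alpha_index_alt (entries : List (List (String × String))) : List (String × List (List (String × String))) :=
  let keyed := entries.filterMap (fun e =>
    match ((PySem.Dict.mk e).getD "title" "").toList with
    | [] => none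
    | c :: _ => some (pvBucket c, e))
  let keys := PySem.List.dedup (keyed.map Prod.fst)
  keys.map (fun k => (k, (keyed.filter (fun p => p.1 == k)).map Prod.snd))

-- ===== PRECONDITION & SPEC =====
def Spec_build_alpha_index (entries : List (List (String × String))) (out : List (String × List (List (String × String)))) : Prop := out = build_alpha_index_alt entries
instance (entries : List (List (String × String))) (out : List (String × List (List (String × String)))) : Decidable (Spec_build_alpha_index entries out) := by unfold Spec_build_alpha_index; infer_instance

-- ===== CLAIM (what is proved, stated in full; the proofs are below) =====
def Claim_equal_build_alpha_index : Prop := ∀ (entries : List (List (String × String))), Dom_build_alpha_index entries → Spec_build_alpha_index entries (build_alpha_index entries)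

-- ===== LEMMAS AND PROOFS =====

-- the tagged list B builds
def pvKeyed (entries : List (List (String × String))) : List (String × List (String × String)) :=
  entries.filterMap (fun e =>
    match ((PySem.Dict.mk e).getD "title" "").toList with
    | [] => none
    | c :: _ => some (pvBucket c, e))

-- A's loop over entries is the uniform modify-loop over the tagged list
theorem pv_fold_fuse (entries : List (List (String × String)))
    (d : PySem.Dict String (List (List (String × String)))) :
    entries.foldl
      (fun alpha entry =>
        let title := (PySem.Dict.mk entry).getD "title" ""
        match title.toList with
        | [] => alpha
        | c :: _ =>
          let fc := PySem.Chars.lowerChar c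
          if PySem.Chars.isalpha fc then
            alpha.modify (String.ofList [fc]) [] (fun v => v ++ [entry])
          else
            alpha.modify "0-9" [] (fun v => v ++ [entry])) d
    = (pvKeyed entries).foldl (fun d p => d.modify p.1 [] (fun v => v ++ [p.2])) d := by
  induction entries generalizing d with
  | nil => rfl
  | cons e es ih =>
    simp only [pvKeyed, List.filterMap_cons, List.foldl_cons]
    cases h : ((PySem.Dict.mk e).getD "title" "").toList with
    | nil => simpa [h, pvKeyed] using ih d
    | cons c rest =>
      simp only [pvBucket]
      by_cases ha : PySem.Chars.isalpha (PySem.Chars.lowerChar c)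
      · simpa [ha, pvKeyed] using ih _
      · simpa [ha, pvKeyed] using ih _

-- ===== VERDICT (by name: the statement is the Claim_ definition above) =====
theorem build_alpha_index_spec : Claim_equal_build_alpha_index := by
  intro entries _
  unfold Spec_build_alpha_index build_alpha_index build_alpha_index_alt
  rw [pv_fold_fuse]
  have hnd : ((pvKeyed entries).foldl (fun d p => d.modify p.1 [] (fun v => v ++ [p.2]))
      PySem.Dict.empty).keys.Nodup :=
    PySem.Dict.nodup_keys_foldl_modify_key (pvKeyed entries) Prod.fst []
      (fun _ p => (fun v => v ++ [p.2])) PySem.Dict.empty PySem.Dict.nodup_keys_empty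
  rw [PySem.Dict.items_eq_map_keys _ hnd []]
  rw [PySem.Dict.keys_foldl_modify_key (pvKeyed entries) Prod.fst []
      (fun _ p => (fun v => v ++ [p.2])) PySem.Dict.empty]
  simp only [PySem.Dict.keys_empty, PySem.Set.update_nil_left, PySem.List.dedup_eq_ofList, pvKeyed]
  apply List.map_congr_left
  intro k _
  rw [PySem.Dict.getD_foldl_modify_append, PySem.Dict.getD_empty]
  simp
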